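-- pv_equiv track=rewrite | github.com/NEU-SNS/app-tls-pinning | code/certificate-pinning/DynamicAnalysis/stats_scripts/detect_pinning.py | remove_known_tp
-- ===== SOURCE A (Python) =====
-- def remove_known_tp(third_parties, known_tp_ends):
--     ret_tp = {}
--     for key, values in third_parties.items():
--         tmp = []
--         for domain in values:
--             add = True
--             # Check ends for now, we can do full domains later
--             for tp in known_tp_ends:
--                 if domain.endswith(tp):
--                     add = False
--             if add:
--                 tmp.append(domain)
--         if len(tmp) > 0:
--             ret_tp[key] = tmp
--     return ret_tp
-- ===== SOURCE B (Python) =====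
-- def remove_known_tp(third_parties, known_tp_ends):
--     # Build a trie of the REVERSED known endings once, then walk each
--     # reversed domain through it: one pass per domain instead of one
--     # endswith-scan per (domain, ending) pair.
--     trie = {}
--     for tp in known_tp_ends:
--         node = trie
--         for ch in reversed(tp):
--             node = node.setdefault(ch, {})
--         node[None] = True
--
--     def matches(domain):
--         node = trie
--         if None in node:
--             return True
--         for ch in reversed(domain):
--             node = node.get(ch)
--             if node is None:
--                 return False
--             if None in node:
--                 return True
--         return False
--
--     ret_tp = {}
--     for key, values in third_parties.items():
--         tmp = [d for d in values if not matches(d)]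
--         if tmp:
--             ret_tp[key] = tmp
--     return ret_tp
-- ===== Notes on version B (the rewrite author's own statement) =====
-- stated objective: faster
-- what changed: Replaces the per-domain scan over all known endings (each an endswith pass) by a reversed-suffix trie built once from the endings, so each domain is matched in a single walk over its characters.
import Mathlib
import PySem

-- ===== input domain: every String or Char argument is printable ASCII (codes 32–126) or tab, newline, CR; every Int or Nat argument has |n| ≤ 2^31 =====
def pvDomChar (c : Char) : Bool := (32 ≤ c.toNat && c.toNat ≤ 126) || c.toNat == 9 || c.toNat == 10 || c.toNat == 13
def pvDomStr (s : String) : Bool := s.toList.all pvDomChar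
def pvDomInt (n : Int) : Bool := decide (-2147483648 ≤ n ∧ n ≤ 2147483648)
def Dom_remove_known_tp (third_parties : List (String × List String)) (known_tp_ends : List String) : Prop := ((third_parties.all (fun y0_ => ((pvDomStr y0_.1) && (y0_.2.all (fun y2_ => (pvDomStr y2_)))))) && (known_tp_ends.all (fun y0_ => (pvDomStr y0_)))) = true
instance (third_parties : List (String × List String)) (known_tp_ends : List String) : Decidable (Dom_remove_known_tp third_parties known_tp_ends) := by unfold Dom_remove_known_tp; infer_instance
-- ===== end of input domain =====

-- B replaces A's per-domain scan over every known ending by a reversed-suffix trie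
-- built once from the endings, walking each reversed domain once (objective: faster).
-- ===== PORT A =====
def remove_known_tp (third_parties : List (String × List String)) (known_tp_ends : List String) : List (String × List String) :=
  (third_parties.foldl
    (fun (ret_tp : PySem.Dict String (List String)) kv =>
      let tmp := kv.2.foldl
        (fun tmp domain =>
          let add := known_tp_ends.foldl
            (fun add tp => if PySem.Str.endswith domain tp then false else add) true
          if add then tmp ++ [domain] else tmp) []
      if tmp.length > 0 then ret_tp.insert kv.1 tmp else ret_tp)
    PySem.Dict.empty).items

-- ===== PORT B =====
-- trie children as a first-child/next-sibling chain (the Python's nested dicts,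
-- with each dict rendered as an association chain): node c stop children sibling
inductive CTrie where
  | nil : CTrie
  | node : Char → Bool → CTrie → CTrie → CTrie
  deriving DecidableEq, Repr

-- node.get(ch) on the children chain
def findCh : CTrie → Char → Option (Bool × CTrie)
  | .nil, _ => none
  | .node c' s ch rest, c => if c' = c then some (s, ch) else findCh rest c

mutual
-- insert the (already reversed) character list below a node (stop flag, children)
def insNode : Bool × CTrie → List Char → Bool × CTrie
  | (_, ch), [] => (true, ch)
  | (s, ch), c :: cs => (s, updCh ch c cs)
termination_by n l => (l.length, 0)
-- node.setdefault(c, {}) then recurse: update the child for c inside the chain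
def updCh : CTrie → Char → List Char → CTrie
  | .nil, c, cs => .node c (insNode (false, .nil) cs).1 (insNode (false, .nil) cs).2 .nil
  | .node c' s ch rest, c, cs =>
      if c' = c then .node c' (insNode (s, ch) cs).1 (insNode (s, ch) cs).2 rest
      else .node c' s ch (updCh rest c cs)
termination_by ch c cs => (cs.length, sizeOf ch + 1)
end

-- matches(domain): walk the reversed domain, true as soon as a stop flag is seen
def queryT : Bool × CTrie → List Char → Bool
  | (s, _), [] => s
  | (s, ch), c :: cs =>
      s || (match findCh ch c with
            | none => false
            | some n => queryT n cs)
termination_by n l => l.length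

def remove_known_tp_alt (third_parties : List (String × List String)) (known_tp_ends : List String) : List (String × List String) :=
  let trie : Bool × CTrie := known_tp_ends.foldl (fun t tp => insNode t tp.toList.reverse) (false, CTrie.nil)
  third_parties.foldl
    (fun (ret_tp : List (String × List String)) kv =>
      let tmp : List String := kv.2.filter (fun d => !(queryT trie d.toList.reverse))
      if tmp ≠ [] then ret_tp ++ [(kv.1, tmp)] else ret_tp)
    []

-- ===== PRECONDITION & SPEC =====
-- Pre_: the first argument stands for a Python dict, so its keys are pairwise
-- distinct; this excludes no input the Python function can receive.
def Pre_remove_known_tp (third_parties : List (String × List String)) (known_tp_ends : List String) : Prop :=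
  (third_parties.map Prod.fst).Nodup
instance (third_parties : List (String × List String)) (known_tp_ends : List String) : Decidable (Pre_remove_known_tp third_parties known_tp_ends) := by unfold Pre_remove_known_tp; infer_instance
def pvWitness_remove_known_tp : (List (String × List String)) × List String :=
  ([("x", ["a.com", "b.net"]), ("y", ["c.net"])], [".net"])
def Spec_remove_known_tp (third_parties : List (String × List String)) (known_tp_ends : List String) (out : List (String × List String)) : Prop := out = remove_known_tp_alt third_parties known_tp_ends
instance (third_parties : List (String × List String)) (known_tp_ends : List String) (out : List (String × List String)) : Decidable (Spec_remove_known_tp third_parties known_tp_ends out) := by unfold Spec_remove_known_tp; infer_instance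

-- ===== CLAIM (what is proved, stated in full; the proofs are below) =====
def Claim_equal_remove_known_tp : Prop := ∀ (third_parties : List (String × List String)) (known_tp_ends : List String), Dom_remove_known_tp third_parties known_tp_ends → Pre_remove_known_tp third_parties known_tp_ends → Spec_remove_known_tp third_parties known_tp_ends (remove_known_tp third_parties known_tp_ends)

-- ===== LEMMAS AND PROOFS =====
theorem queryT_nil (x : List Char) : queryT (false, CTrie.nil) x = false := by
  cases x <;> simp [queryT, findCh]

theorem findCh_updCh_self (ch : CTrie) (c : Char) (cs : List Char) :
    findCh (updCh ch c cs) c = some (insNode ((findCh ch c).getD (false, CTrie.nil)) cs) := by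
  induction ch with
  | nil => simp [updCh, findCh]
  | node c' s t rest iht ihr =>
      by_cases h : c' = c
      · subst h; simp [updCh, findCh]
      · simp [updCh, findCh, h, ihr]

theorem findCh_updCh_ne (ch : CTrie) {c c' : Char} (h : c' ≠ c) (cs : List Char) :
    findCh (updCh ch c cs) c' = findCh ch c' := by
  induction ch with
  | nil => simp [updCh, findCh, Ne.symm h]
  | node a s t rest iht ihr =>
      by_cases ha : a = c
      · subst ha; simp [updCh, findCh, Ne.symm h]
      · by_cases ha' : a = c' <;> simp [updCh, findCh, ha, ha', h, ihr]

theorem queryT_insNode (l : List Char) : ∀ (n : Bool × CTrie) (x : List Char),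
    queryT (insNode n l) x = (l.isPrefixOf x || queryT n x) := by
  induction l with
  | nil =>
      rintro ⟨s, ch⟩ x
      cases x <;> simp [insNode, queryT, List.isPrefixOf]
  | cons a as ih =>
      rintro ⟨s, ch⟩ x
      cases x with
      | nil => simp [insNode, queryT, List.isPrefixOf]
      | cons b bs =>
          by_cases hab : a = b
          · subst hab
            simp only [insNode, queryT, List.isPrefixOf, findCh_updCh_self, ih, beq_self_eq_true,
              Bool.true_and]
            cases hf : findCh ch a with
            | none =>
                simp [queryT_nil]
                cases s <;> cases as.isPrefixOf bs <;> simp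
            | some n0 =>
                simp
                cases s <;> cases as.isPrefixOf bs <;> simp
          · simp [insNode, queryT, List.isPrefixOf, findCh_updCh_ne _ (Ne.symm hab), hab]

theorem queryT_foldl (ends : List String) : ∀ (n : Bool × CTrie) (x : List Char),
    queryT (ends.foldl (fun t tp => insNode t tp.toList.reverse) n) x
      = (ends.any (fun tp => tp.toList.reverse.isPrefixOf x) || queryT n x) := by
  induction ends with
  | nil => intro n x; simp
  | cons e es ih =>
      intro n x
      simp [List.foldl_cons, ih, queryT_insNode, Bool.or_comm, Bool.or_assoc]

theorem endswith_eq_rev_prefix (d tp : String) :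
    PySem.Str.endswith d tp = tp.toList.reverse.isPrefixOf d.toList.reverse := by
  rw [Bool.eq_iff_iff]
  simp only [PySem.Str.endswith_eq, PySem.Chars.endswith_iff, List.isPrefixOf_iff_prefix,
    List.reverse_prefix]

theorem add_foldl (p : String → Bool) (ends : List String) : ∀ b : Bool,
    ends.foldl (fun add tp => if p tp then false else add) b = (b && !(ends.any p)) := by
  induction ends with
  | nil => intro b; simp
  | cons e es ih =>
      intro b
      rw [List.foldl_cons]
      have hinit : (if p e = true then false else b) = (b && !(p e)) := by
        cases h : p e <;> simp
      rw [show List.foldl (fun add tp => if p tp = true then false else add)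
            ((fun add tp => if p tp = true then false else add) b e) es
          = List.foldl (fun add tp => if p tp = true then false else add) (b && !(p e)) es
          from by rw [show (fun add tp => if p tp = true then false else add) b e
              = (if p e = true then false else b) from rfl, hinit], ih]
      cases b <;> cases h : p e <;> simp [h]

-- the inner domain loop of A equals B's trie filter
theorem tmp_eq (ends : List String) (vals : List String) :
    vals.foldl
      (fun tmp domain =>
        let add := ends.foldl (fun add tp => if PySem.Str.endswith domain tp then false else add) true
        if add then tmp ++ [domain] else tmp) []
    = vals.filter (fun d =>
        !(queryT (ends.foldl (fun t tp => insNode t tp.toList.reverse) (false, CTrie.nil)) d.toList.reverse)) := by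
  have hbody : ∀ d : String,
      ends.foldl (fun add tp => if PySem.Str.endswith d tp then false else add) true
      = !(queryT (ends.foldl (fun t tp => insNode t tp.toList.reverse) (false, CTrie.nil)) d.toList.reverse) := by
    intro d
    simp only [add_foldl, Bool.true_and, queryT_foldl, queryT_nil, Bool.or_false]
    have h2 : ends.any (PySem.Str.endswith d)
        = ends.any (fun tp => tp.toList.reverse.isPrefixOf d.toList.reverse) :=
      congrArg (List.any ends) (funext (endswith_eq_rev_prefix d))
    rw [h2]
  have hfun : (fun (tmp : List String) (domain : String) =>
        let add := ends.foldl (fun add tp => if PySem.Str.endswith domain tp then false else add) true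
        if add then tmp ++ [domain] else tmp)
      = (fun tmp domain =>
          if (!(queryT (ends.foldl (fun t tp => insNode t tp.toList.reverse) (false, CTrie.nil)) domain.toList.reverse)) then tmp ++ [domain] else tmp) := by
    funext tmp d
    show (if (ends.foldl (fun add tp => if PySem.Str.endswith d tp then false else add) true) = true
          then tmp ++ [d] else tmp) = _
    rw [hbody d]
  rw [hfun, PySem.List.foldl_append_if_eq_filter]
  simp

-- 'if p(x): out.append(f(x))' loop with a Prop test
theorem foldl_app_if {α β : Type} (p : α → Prop) [DecidablePred p] (f : α → β)
    (l : List α) : ∀ (acc : List β),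
    l.foldl (fun acc x => if p x then acc ++ [f x] else acc) acc
      = acc ++ (l.filter (fun x => decide (p x))).map f := by
  induction l with
  | nil => intro acc; simp
  | cons a as ih =>
      intro acc
      by_cases h : p a <;> simp [List.foldl_cons, h, ih]

-- outer loop: inserting under pairwise-distinct fresh keys appends to the items list
theorem dict_fold_items (F : String × List String → List String)
    (p : String × List String → Prop) [DecidablePred p] :
    ∀ (l : List (String × List String)) (d : PySem.Dict String (List String)),
      (l.map Prod.fst).Nodup → (∀ k ∈ l.map Prod.fst, d.contains k = false) →
      (l.foldl (fun ret kv => if p kv then ret.insert kv.1 (F kv) else ret) d).items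
        = d.items ++ (l.filter (fun kv => decide (p kv))).map (fun kv => (kv.1, F kv)) := by
  intro l
  induction l with
  | nil => intro d _ _; simp
  | cons kv rest ih =>
      intro d hnd hfresh
      have hk : d.contains kv.1 = false := hfresh kv.1 (by simp)
      have hnd' : (rest.map Prod.fst).Nodup := (List.nodup_cons.mp (by simpa using hnd)).2
      have hknot : kv.1 ∉ rest.map Prod.fst := (List.nodup_cons.mp (by simpa using hnd)).1
      by_cases hp : p kv
      · have hfresh' : ∀ k ∈ rest.map Prod.fst, (d.insert kv.1 (F kv)).contains k = false := by
          intro k hkmem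
          rw [PySem.Dict.contains_insert]
          have hne : k ≠ kv.1 := fun h => hknot (h ▸ hkmem)
          simp [hne, hfresh k (by simp [hkmem])]
        rw [List.foldl_cons, if_pos hp, ih (d.insert kv.1 (F kv)) hnd' hfresh',
          PySem.Dict.items_insert_of_not_contains d (F kv) hk]
        simp [hp, List.append_assoc]
      · rw [List.foldl_cons, if_neg hp, ih d hnd' (fun k hkmem => hfresh k (by simp [hkmem]))]
        simp [hp]

-- ===== VERDICT (by name: the statement is the Claim_ definition above) =====
theorem remove_known_tp_spec : Claim_equal_remove_known_tp := by
  intro tps ends _ hpre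
  unfold Spec_remove_known_tp remove_known_tp remove_known_tp_alt
  show (tps.foldl
      (fun (ret_tp : PySem.Dict String (List String)) kv =>
        if (kv.2.foldl
            (fun tmp domain =>
              let add := ends.foldl (fun add tp => if PySem.Str.endswith domain tp then false else add) true
              if add then tmp ++ [domain] else tmp) []).length > 0
        then ret_tp.insert kv.1 (kv.2.foldl
            (fun tmp domain =>
              let add := ends.foldl (fun add tp => if PySem.Str.endswith domain tp then false else add) true
              if add then tmp ++ [domain] else tmp) [])
        else ret_tp)
      PySem.Dict.empty).items
    = tps.foldl
      (fun ret_tp kv =>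
        if (kv.2.filter (fun d =>
              !(queryT (ends.foldl (fun t tp => insNode t tp.toList.reverse) (false, CTrie.nil)) d.toList.reverse))) ≠ []
        then ret_tp ++ [(kv.1, kv.2.filter (fun d =>
              !(queryT (ends.foldl (fun t tp => insNode t tp.toList.reverse) (false, CTrie.nil)) d.toList.reverse)))]
        else ret_tp)
      []
  rw [dict_fold_items _ _ tps PySem.Dict.empty hpre (by intro k _; rfl),
    foldl_app_if _ _ tps []]
  simp only [tmp_eq, List.nil_append]
  have hfilter : ∀ kv : String × List String,
      decide ((kv.2.filter (fun d =>
          !(queryT (ends.foldl (fun t tp => insNode t tp.toList.reverse) (false, CTrie.nil)) d.toList.reverse))).length > 0)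
      = decide ((kv.2.filter (fun d =>
          !(queryT (ends.foldl (fun t tp => insNode t tp.toList.reverse) (false, CTrie.nil)) d.toList.reverse))) ≠ []) := by
    intro kv
    cases h : (kv.2.filter (fun d =>
        !(queryT (ends.foldl (fun t tp => insNode t tp.toList.reverse) (false, CTrie.nil)) d.toList.reverse))) <;>
      simp [h]
  rw [List.filter_congr (fun kv _ => hfilter kv),
    show (PySem.Dict.empty : PySem.Dict String (List String)).items = [] from rfl,
    List.nil_append]
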